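-- pv_equiv track=rewrite | github.com/chh105/MetaPlanner | cbir/image_retrieval_simsiam.py | get_middle_factors
-- ===== SOURCE A (Python) =====
-- def get_middle_factors(x):
--     factors = []
--     for i in range(1,x+1):
--         if x%i == 0:
--             factors.append(i)
--
--     id = len(factors)//2-1
--     factor1 = factors[id]
--     factor2 = x/factor1
--     return [int(factor1),int(factor2)]
-- ===== SOURCE B (Python) =====
-- def get_middle_factors(x):
--     # O(sqrt(x)): scan divisors only up to sqrt(x); the middle pair is the
--     # largest divisor d with d*d <= x (stepping one back when x is a perfect
--     # square > 1, matching the index len(divisors)//2 - 1 of the full list).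
--     small = []
--     d = 1
--     while d * d <= x:
--         if x % d == 0:
--             small.append(d)
--         d += 1
--     f1 = small[-1]
--     if f1 * f1 == x and len(small) >= 2:
--         f1 = small[-2]
--     return [f1, x // f1]
-- ===== Notes on version B (the rewrite author's own statement) =====
-- stated objective: faster
-- what changed: B enumerates divisors only up to sqrt(x) (stopping when d*d > x) and derives the middle pair from the largest such divisor (stepping one back for perfect squares > 1), instead of A's full scan of 1..x building the complete divisor list and indexing its middle.
-- outside the precondition, e.g. on get_middle_factors(0): A raises IndexError, B raises IndexError
import Mathlib
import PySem

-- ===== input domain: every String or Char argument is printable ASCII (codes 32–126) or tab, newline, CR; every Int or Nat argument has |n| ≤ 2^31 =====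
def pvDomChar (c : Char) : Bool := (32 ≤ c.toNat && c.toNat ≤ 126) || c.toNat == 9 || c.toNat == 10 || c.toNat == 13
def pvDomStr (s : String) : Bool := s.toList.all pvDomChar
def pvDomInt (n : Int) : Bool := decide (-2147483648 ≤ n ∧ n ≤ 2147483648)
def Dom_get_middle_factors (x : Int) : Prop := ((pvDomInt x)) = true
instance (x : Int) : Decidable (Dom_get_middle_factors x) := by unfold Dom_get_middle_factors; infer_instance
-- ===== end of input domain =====

-- B finds the middle divisor pair by scanning only up to sqrt(x), instead of A's full 1..x scan (faster, asymptotic).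

-- ===== PORT A =====
def get_middle_factors (x : Int) : List Int :=
  let factors := (PySem.List.pyRange 1 (x + 1) 1).foldl
    (fun acc i => if PySem.Int.mod x i == 0 then acc ++ [i] else acc) []
  let id := PySem.Int.floordiv (factors.length : Int) 2 - 1
  match PySem.List.pyGet? factors id with
  | some factor1 =>
      -- int(x / factor1): the float division is exact here (factor1 divides x, |x| ≤ 2^31 < 2^53),
      -- so int() of it is exactly floor division
      [factor1, PySem.Int.floordiv x factor1]
  | none => []  -- IndexError: excluded by Pre_

-- ===== PORT B =====
-- the 'while d * d <= x' loop of Source B, fuelled (fuel x.toNat + 1 always suffices to reach the exit)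
def altLoop (x : Int) (d : Int) : Nat → List Int
  | 0 => []
  | fuel + 1 =>
      if d * d ≤ x then
        (if PySem.Int.mod x d == 0 then [d] else []) ++ altLoop x (d + 1) fuel
      else []

def get_middle_factors_alt (x : Int) : List Int :=
  let small := altLoop x 1 (x.toNat + 1)
  match PySem.List.pyGet? small (-1) with
  | none => []  -- IndexError: excluded by Pre_
  | some f0 =>
      let f1 := if f0 * f0 == x && decide (2 ≤ small.length)
                then PySem.List.pyGetD small (-2) f0  -- in range: guarded by 2 ≤ len
                else f0
      [f1, PySem.Int.floordiv x f1]

-- ===== PRECONDITION & SPEC =====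
-- Pre_ excludes exactly x ≤ 0, where A's factors list is empty and factors[-1] raises IndexError.
def Pre_get_middle_factors (x : Int) : Prop := 1 ≤ x
instance (x : Int) : Decidable (Pre_get_middle_factors x) := by unfold Pre_get_middle_factors; infer_instance
def pvWitness_get_middle_factors : Int := 12

def Spec_get_middle_factors (x : Int) (out : List Int) : Prop := out = get_middle_factors_alt x
instance (x : Int) (out : List Int) : Decidable (Spec_get_middle_factors x out) := by unfold Spec_get_middle_factors; infer_instance

-- ===== CLAIM (what is proved, stated in full; the proofs are below) =====
def Claim_equal_get_middle_factors : Prop := ∀ (x : Int), Dom_get_middle_factors x → Pre_get_middle_factors x → Spec_get_middle_factors x (get_middle_factors x)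

-- ===== LEMMAS AND PROOFS =====

-- A's divisor list: all i in [1, x] with x % i == 0, ascending
def pvDivs (x : Int) : List Int :=
  (PySem.List.pyRange 1 (x + 1) 1).filter (fun i => PySem.Int.mod x i == 0)

-- B's list: the divisors with i*i ≤ x
def pvSmall (x : Int) : List Int :=
  (pvDivs x).filter (fun i => decide (i * i ≤ x))

theorem pvDivs_pairwise (x : Int) : (pvDivs x).Pairwise (· < ·) := by
  exact List.Pairwise.filter _ (PySem.List.pairwise_lt_pyRange_one 1 (x + 1))

theorem mem_pvDivs {x i : Int} (hx : 1 ≤ x) : i ∈ pvDivs x ↔ 1 ≤ i ∧ i ∣ x := by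
  simp only [pvDivs, List.mem_filter, PySem.List.mem_pyRange_one,
    PySem.Int.mod_eq_zero_iff_dvd, beq_iff_eq]
  constructor
  · rintro ⟨⟨h1, _⟩, h3⟩; exact ⟨h1, h3⟩
  · rintro ⟨h1, h3⟩
    exact ⟨⟨h1, by have := Int.le_of_dvd (by omega) h3; omega⟩, h3⟩

-- A's foldl builds exactly pvDivs
theorem portA_factors (x : Int) :
    (PySem.List.pyRange 1 (x + 1) 1).foldl
      (fun acc i => if PySem.Int.mod x i == 0 then acc ++ [i] else acc) [] = pvDivs x := by
  simpa [pvDivs] using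
    PySem.List.foldl_append_if_eq_filter (fun i => PySem.Int.mod x i == 0)
      (PySem.List.pyRange 1 (x + 1) 1) []

-- B's fuelled loop computes the filter, once fuel is past the exit point
theorem altLoop_eq (x : Int) : ∀ (fuel : Nat) (d : Int), 1 ≤ d → x < d + fuel →
    altLoop x d fuel
      = (PySem.List.pyRange d (x + 1) 1).filter
          (fun i => decide (i * i ≤ x) && (PySem.Int.mod x i == 0)) := by
  intro fuel
  induction fuel with
  | zero =>
      intro d hd hlt
      rw [PySem.List.pyRange_one_eq_nil (by omega)]
      simp [altLoop]
  | succ fuel ih =>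
      intro d hd hlt
      by_cases hq : d * d ≤ x
      · have hdx : d ≤ x := le_trans (by nlinarith) hq
        rw [PySem.List.pyRange_one_cons (by omega)]
        rw [List.filter_cons]
        have : altLoop x d (fuel + 1)
            = (if PySem.Int.mod x d == 0 then [d] else []) ++ altLoop x (d + 1) fuel := by
          simp [altLoop, hq]
        rw [this, ih (d + 1) (by omega) (by omega)]
        by_cases hm : PySem.Int.mod x d == 0 <;> simp [hm, hq]
      · have hnil : altLoop x d (fuel + 1) = [] := by simp [altLoop, hq]
        rw [hnil]
        symm
        rw [List.filter_eq_nil_iff]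
        intro i hi
        rw [PySem.List.mem_pyRange_one] at hi
        have : ¬ (i * i ≤ x) := by nlinarith [hi.1, hi.2]
        simp [this]

theorem portB_small (x : Int) (hx : 1 ≤ x) : altLoop x 1 (x.toNat + 1) = pvSmall x := by
  rw [altLoop_eq x (x.toNat + 1) 1 (by omega) (by omega)]
  rw [pvSmall, pvDivs, List.filter_filter]

-- a strictly increasing list splits as (filter q) ++ (filter ¬q) when q is downward closed along it
theorem pairwise_filter_split (q : Int → Bool) :
    ∀ (l : List Int), l.Pairwise (· < ·) →
    (∀ a b, a ∈ l → b ∈ l → a ≤ b → q b = true → q a = true) →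
    l = l.filter q ++ l.filter (fun a => !q a) := by
  intro l hp hcl
  induction l with
  | nil => simp
  | cons a t ih =>
      have hpt : t.Pairwise (· < ·) := hp.of_cons
      have hclt : ∀ c b, c ∈ t → b ∈ t → c ≤ b → q b = true → q c = true := by
        intro c b hc hb hcb hqb
        exact hcl c b (List.mem_cons_of_mem _ hc) (List.mem_cons_of_mem _ hb) hcb hqb
      by_cases hqa : q a = true
      · simp only [List.filter_cons, hqa]
        simpa using ih hpt hclt
      · have hqt : t.filter q = [] := by
          rw [List.filter_eq_nil_iff]
          intro b hb hqb
          have hab : a < b := (List.pairwise_cons.mp hp).1 b hb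
          exact hqa (hcl a b (List.mem_cons_self) (List.mem_cons_of_mem _ hb) (le_of_lt hab) hqb)
        have hqtall : t.filter (fun a => !q a) = t := by
          rw [List.filter_eq_self]
          intro b hb
          have hab : a < b := (List.pairwise_cons.mp hp).1 b hb
          by_cases hqb : q b = true
          · exact absurd (hcl a b (List.mem_cons_self) (List.mem_cons_of_mem _ hb) (le_of_lt hab) hqb) hqa
          · simp [hqb]
        simp [hqa, hqt, hqtall]

-- two strictly increasing integer lists with the same members are equal
theorem eq_of_pairwise_lt_of_mem_iff :
    ∀ (l₁ l₂ : List Int), l₁.Pairwise (· < ·) → l₂.Pairwise (· < ·) →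
    (∀ a, a ∈ l₁ ↔ a ∈ l₂) → l₁ = l₂ := by
  intro l₁
  induction l₁ with
  | nil =>
      intro l₂ _ _ hmem
      cases l₂ with
      | nil => rfl
      | cons b t₂ => exact absurd ((hmem b).mpr List.mem_cons_self) (by simp)
  | cons a t₁ ih =>
      intro l₂ h₁ h₂ hmem
      cases l₂ with
      | nil => exact absurd ((hmem a).mp List.mem_cons_self) (by simp)
      | cons b t₂ =>
          have hab : a = b := by
            rcases List.mem_cons.mp ((hmem a).mp List.mem_cons_self) with h | h
            · exact h
            · rcases List.mem_cons.mp ((hmem b).mpr List.mem_cons_self) with h' | h'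
              · exact h'.symm
              · have h1 := (List.pairwise_cons.mp h₂).1 a h
                have h2 := (List.pairwise_cons.mp h₁).1 b h'
                omega
          subst hab
          have htail : ∀ c, c ∈ t₁ ↔ c ∈ t₂ := by
            intro c
            constructor
            · intro hc
              have hac := (List.pairwise_cons.mp h₁).1 c hc
              rcases List.mem_cons.mp ((hmem c).mp (List.mem_cons_of_mem _ hc)) with h | h
              · omega
              · exact h
            · intro hc
              have hac := (List.pairwise_cons.mp h₂).1 c hc
              rcases List.mem_cons.mp ((hmem c).mpr (List.mem_cons_of_mem _ hc)) with h | h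
              · omega
              · exact h
          rw [ih t₂ h₁.of_cons h₂.of_cons htail]

theorem mem_pvSmall {x i : Int} (hx : 1 ≤ x) :
    i ∈ pvSmall x ↔ (1 ≤ i ∧ i ∣ x) ∧ i * i ≤ x := by
  simp [pvSmall, List.mem_filter, mem_pvDivs hx]

theorem pvSmall_pairwise (x : Int) : (pvSmall x).Pairwise (· < ·) :=
  List.Pairwise.filter _ (pvDivs_pairwise x)

-- basic facts about the complement x/d of a positive divisor d
theorem divCompl {x d : Int} (hx : 1 ≤ x) (hd : 1 ≤ d) (hdvd : d ∣ x) :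
    1 ≤ x / d ∧ (x / d) ∣ x ∧ (x / d) * d = x ∧ x / (x / d) = d := by
  obtain ⟨u, hu⟩ := hdvd
  have hd0 : d ≠ 0 := by omega
  have hdiv : x / d = u := by rw [hu]; exact Int.mul_ediv_cancel_left u hd0
  have hu1 : 1 ≤ u := by nlinarith
  refine ⟨by omega, ⟨d, by rw [hdiv, hu]; ring⟩, by rw [hdiv, hu]; ring, ?_⟩
  rw [hdiv, hu, mul_comm]
  exact Int.mul_ediv_cancel_left d (by omega)

-- the complement map is strictly antitone on positive divisors
theorem div_lt_div_divisors {x a b : Int} (hx : 1 ≤ x) (ha : 1 ≤ a) (hb : 1 ≤ b)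
    (hax : a ∣ x) (hbx : b ∣ x) (hab : a < b) : x / b < x / a := by
  obtain ⟨h1, _, h3, _⟩ := divCompl hx ha hax
  obtain ⟨h1', _, h3', _⟩ := divCompl hx hb hbx
  nlinarith

-- the complement map d ↦ x/d sends pvSmall, reversed, onto the divisors with x ≤ i*i
theorem map_div_small (x : Int) (hx : 1 ≤ x) :
    ((pvSmall x).map (fun d => x / d)).reverse
      = (pvDivs x).filter (fun i => decide (x ≤ i * i)) := by
  apply eq_of_pairwise_lt_of_mem_iff
  · rw [List.pairwise_reverse, List.pairwise_map]
    apply List.Pairwise.imp_of_mem ?_ (pvSmall_pairwise x)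
    intro a b ha hb hab
    obtain ⟨⟨ha1, hadvd⟩, _⟩ := (mem_pvSmall hx).mp ha
    obtain ⟨⟨hb1, hbdvd⟩, _⟩ := (mem_pvSmall hx).mp hb
    exact div_lt_div_divisors hx ha1 hb1 hadvd hbdvd hab
  · exact List.Pairwise.filter _ (pvDivs_pairwise x)
  · intro e
    rw [List.mem_reverse, List.mem_map]
    rw [List.mem_filter]
    constructor
    · rintro ⟨d, hd, rfl⟩
      obtain ⟨⟨hd1, hdvd⟩, hdsq⟩ := (mem_pvSmall hx).mp hd
      obtain ⟨h1, h2, h3, _⟩ := divCompl hx hd1 hdvd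
      refine ⟨(mem_pvDivs hx).mpr ⟨h1, h2⟩, by simp; nlinarith⟩
    · rintro ⟨he, hesq⟩
      obtain ⟨he1, hedvd⟩ := (mem_pvDivs hx).mp he
      simp only [decide_eq_true_eq] at hesq
      obtain ⟨h1, h2, h3, h4⟩ := divCompl hx he1 hedvd
      refine ⟨x / e, (mem_pvSmall hx).mpr ⟨⟨h1, h2⟩, by nlinarith⟩, h4⟩

-- length bookkeeping: |divs| = 2*|small| - (1 if x is a square else 0)
theorem divs_length (x : Int) (hx : 1 ≤ x) :
    (pvDivs x).length + ((pvDivs x).filter (fun i => decide (i * i = x))).length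
      = 2 * (pvSmall x).length := by
  have hclL : ∀ a b, a ∈ pvDivs x → b ∈ pvDivs x → a ≤ b →
      decide (b * b < x) = true → decide (a * a < x) = true := by
    intro a b ha hb hab hqb
    have ha1 := ((mem_pvDivs hx).mp ha).1
    simp only [decide_eq_true_eq] at hqb ⊢
    nlinarith
  have h1 := pairwise_filter_split (fun i => decide (i * i < x)) (pvDivs x)
    (pvDivs_pairwise x) hclL
  have h2 : (pvDivs x).filter (fun i => !decide (i * i < x))
      = (pvDivs x).filter (fun i => decide (x ≤ i * i)) := by
    apply List.filter_congr
    intro i _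
    by_cases h : i * i < x <;> (simp [h]; try omega)
  have h3 : ((pvDivs x).filter (fun i => decide (x ≤ i * i))).length
      = (pvSmall x).length := by
    rw [← map_div_small x hx, List.length_reverse, List.length_map]
  have hclS : ∀ a b, a ∈ pvSmall x → b ∈ pvSmall x → a ≤ b →
      decide (b * b < x) = true → decide (a * a < x) = true := by
    intro a b ha hb hab hqb
    have ha1 := ((mem_pvSmall hx).mp ha).1.1
    simp only [decide_eq_true_eq] at hqb ⊢
    nlinarith
  have h4 := pairwise_filter_split (fun i => decide (i * i < x)) (pvSmall x)
    (pvSmall_pairwise x) hclS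
  have h5 : (pvSmall x).filter (fun i => decide (i * i < x))
      = (pvDivs x).filter (fun i => decide (i * i < x)) := by
    rw [pvSmall, List.filter_filter]
    apply List.filter_congr
    intro i _
    by_cases h : i * i < x <;> by_cases h' : i * i ≤ x <;> (simp [h, h']; try omega)
  have h6 : (pvSmall x).filter (fun i => !decide (i * i < x))
      = (pvDivs x).filter (fun i => decide (i * i = x)) := by
    rw [pvSmall, List.filter_filter]
    apply List.filter_congr
    intro i _
    by_cases h : i * i < x <;> by_cases h' : i * i ≤ x <;> (simp [h, h']; try omega)
  have e1 : (pvDivs x).length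
      = ((pvDivs x).filter (fun i => decide (i * i < x))).length
        + (pvSmall x).length := by
    conv_lhs => rw [h1]
    rw [List.length_append, h2, h3]
  have e2 : (pvSmall x).length
      = ((pvDivs x).filter (fun i => decide (i * i < x))).length
        + ((pvDivs x).filter (fun i => decide (i * i = x))).length := by
    conv_lhs => rw [h4]
    rw [List.length_append, h5, h6]
  omega

theorem get_middle_factors_spec' (x : Int) (hx : 1 ≤ x) :
    get_middle_factors x = get_middle_factors_alt x := by
  -- the divisor list splits as small divisors ++ large divisors
  have hsplit : pvDivs x = pvSmall x
      ++ (pvDivs x).filter (fun i => !decide (i * i ≤ x)) := by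
    apply pairwise_filter_split _ _ (pvDivs_pairwise x)
    intro a b ha hb hab hqb
    have ha1 := ((mem_pvDivs hx).mp ha).1
    simp only [decide_eq_true_eq] at hqb ⊢
    nlinarith
  have hm1 : (1 : Int) ∈ pvSmall x :=
    (mem_pvSmall hx).mpr ⟨⟨le_refl 1, one_dvd x⟩, by nlinarith⟩
  have hmpos : 0 < (pvSmall x).length := List.length_pos_of_mem hm1
  have hlen := divs_length x hx
  -- the filter of exact square roots has at most one element
  have hE1 : ((pvDivs x).filter (fun i => decide (i * i = x))).length ≤ 1 := by
    by_contra h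
    have hp : ((pvDivs x).filter (fun i => decide (i * i = x))).Pairwise (· < ·) :=
      List.Pairwise.filter _ (pvDivs_pairwise x)
    have h01 := (List.pairwise_iff_getElem.mp hp) 0 1 (by omega) (by omega) (by omega)
    have hm0 := List.getElem_mem (l := (pvDivs x).filter (fun i => decide (i * i = x)))
      (n := 0) (by omega)
    have hm1' := List.getElem_mem (l := (pvDivs x).filter (fun i => decide (i * i = x)))
      (n := 1) (by omega)
    rw [List.mem_filter] at hm0 hm1'
    have e0 := hm0.2; have e1 := hm1'.2
    simp only [decide_eq_true_eq] at e0 e1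
    have g0 := ((mem_pvDivs hx).mp hm0.1).1
    nlinarith
  -- the last small divisor
  obtain ⟨r, hr⟩ : ∃ r, (pvSmall x)[(pvSmall x).length - 1]? = some r :=
    ⟨_, List.getElem?_eq_getElem (by omega)⟩
  have hrS : r ∈ pvSmall x := List.mem_of_getElem? hr
  obtain ⟨⟨hr1, hrdvd⟩, hrsq⟩ := (mem_pvSmall hx).mp hrS
  have hmax : ∀ a ∈ pvSmall x, a ≤ r := by
    intro a ha
    obtain ⟨j, hj, rfl⟩ := List.getElem_of_mem ha
    rcases Nat.lt_or_ge j ((pvSmall x).length - 1) with hlt | hge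
    · have := (List.pairwise_iff_getElem.mp (pvSmall_pairwise x)) j
        ((pvSmall x).length - 1) hj (by omega) hlt
      have hr' : (pvSmall x)[(pvSmall x).length - 1]'(by omega) = r := by
        have := List.getElem?_eq_getElem (l := pvSmall x)
          (i := (pvSmall x).length - 1) (by omega)
        rw [hr] at this; exact (Option.some.inj this).symm
      omega
    · have hj' : j = (pvSmall x).length - 1 := by omega
      subst hj'
      have := List.getElem?_eq_getElem (l := pvSmall x)
        (i := (pvSmall x).length - 1) (by omega)
      rw [hr] at this
      exact le_of_eq (Option.some.inj this).symm
  -- unfold both ports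
  simp only [get_middle_factors, get_middle_factors_alt, portA_factors x,
    portB_small x hx, PySem.List.pyGet?_neg_one, List.getLast?_eq_getElem?, hr]
  rw [PySem.Int.floordiv_eq_ediv_of_pos (by omega)]
  rcases Nat.lt_or_ge ((pvDivs x).filter (fun i => decide (i * i = x))).length 1 with hc | hc
  · -- x is not a perfect square: |divs| = 2m, the middle index is m-1
    have hE0 : ((pvDivs x).filter (fun i => decide (i * i = x))).length = 0 := by omega
    have hnotsq : ¬ (r * r = x) := by
      intro h
      have : r ∈ (pvDivs x).filter (fun i => decide (i * i = x)) := by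
        rw [List.mem_filter]
        exact ⟨(mem_pvDivs hx).mpr ⟨hr1, hrdvd⟩, by simp [h]⟩
      rw [List.length_eq_zero_iff.mp hE0] at this
      simp at this
    have hid : ((pvDivs x).length : Int) / 2 - 1
        = (((pvSmall x).length - 1 : Nat) : Int) := by omega
    rw [hid, PySem.List.pyGet?_natCast]
    have hget : (pvDivs x)[(pvSmall x).length - 1]? = some r := by
      rw [hsplit, List.getElem?_append_left (by omega)]
      exact hr
    rw [hget]
    have hcond : (r * r == x) = false := by simp [hnotsq]
    simp [hcond]
  · -- x is a perfect square: |divs| = 2m - 1, and r is the square root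
    have hEeq : ((pvDivs x).filter (fun i => decide (i * i = x))).length = 1 := by omega
    obtain ⟨rt, hErt⟩ := List.length_eq_one_iff.mp hEeq
    have hrtE : rt ∈ (pvDivs x).filter (fun i => decide (i * i = x)) := by
      rw [hErt]; exact List.mem_cons_self
    rw [List.mem_filter] at hrtE
    obtain ⟨hrt1, hrtdvd⟩ := (mem_pvDivs hx).mp hrtE.1
    have hrtsq : rt * rt = x := by simpa using hrtE.2
    have hrtS : rt ∈ pvSmall x :=
      (mem_pvSmall hx).mpr ⟨⟨hrt1, hrtdvd⟩, le_of_eq hrtsq⟩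
    have hreq : r = rt := by
      have h1 := hmax rt hrtS
      nlinarith
    subst hreq
    have hcond1 : (r * r == x) = true := by simp [hrtsq]
    rcases Nat.lt_or_ge ((pvSmall x).length) 2 with hm2 | hm2
    · -- m = 1: the whole divisor list is [r] (x = 1); index -1 wraps to the last element
      have hmeq : (pvSmall x).length = 1 := by omega
      have hneq : (pvDivs x).length = 1 := by omega
      have hid : ((pvDivs x).length : Int) / 2 - 1 = -1 := by rw [hneq]; decide
      rw [hid, PySem.List.pyGet?_neg_one, List.getLast?_eq_getElem?]
      have hget : (pvDivs x)[(pvDivs x).length - 1]? = some r := by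
        have hidx : (pvDivs x).length - 1 = (pvSmall x).length - 1 := by omega
        rw [hidx, hsplit, List.getElem?_append_left (by omega)]
        exact hr
      rw [hget]
      have hcond : (r * r == x && decide (2 ≤ (pvSmall x).length)) = false := by
        simp [hmeq]
      simp [hcond]
    · -- m ≥ 2: the middle index is m-2, B steps one back from the root
      have hid : ((pvDivs x).length : Int) / 2 - 1
          = (((pvSmall x).length - 2 : Nat) : Int) := by omega
      rw [hid, PySem.List.pyGet?_natCast]
      obtain ⟨s2, hs2⟩ : ∃ s2, (pvSmall x)[(pvSmall x).length - 2]? = some s2 :=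
        ⟨_, List.getElem?_eq_getElem (by omega)⟩
      have hget : (pvDivs x)[(pvSmall x).length - 2]? = some s2 := by
        rw [hsplit, List.getElem?_append_left (by omega)]
        exact hs2
      rw [hget]
      have hcond : (r * r == x && decide (2 ≤ (pvSmall x).length)) = true := by
        simp [hrtsq, hm2]
      simp only [hcond, if_true]
      have hgd : PySem.List.pyGetD (pvSmall x) (-2) r
          = (pvSmall x)[(pvSmall x).length - 2]'(by omega) := by
        rw [PySem.List.pyGetD_neg_ofNat (pvSmall x) 2 r (by omega) (by omega)]
      rw [hgd]
      have : (pvSmall x)[(pvSmall x).length - 2]'(by omega) = s2 := by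
        have := List.getElem?_eq_getElem (l := pvSmall x)
          (i := (pvSmall x).length - 2) (by omega)
        rw [hs2] at this; exact (Option.some.inj this).symm
      rw [this]

-- ===== VERDICT (by name: the statement is the Claim_ definition above) =====
theorem get_middle_factors_spec : Claim_equal_get_middle_factors := by
  intro x _ hpre
  exact get_middle_factors_spec' x hpre
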